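-- pv_equiv track=rewrite | github.com/hyunjoonlee0929/MAPLE_Multi-Agent-based-Protein-Learning-Engine | scripts/train_property_numpy.py | _protein_scaffold_key
-- ===== SOURCE A (Python) =====
-- def _protein_scaffold_key(sequence: str, k: int = 3) -> str:
--     groups = {
--         "A": "H",
--         "V": "H",
--         "I": "H",
--         "L": "H",
--         "M": "H",
--         "F": "H",
--         "W": "H",
--         "Y": "H",
--         "C": "S",
--         "G": "S",
--         "P": "S",
--         "S": "P",
--         "T": "P",
--         "N": "P",
--         "Q": "P",
--         "D": "C",
--         "E": "C",
--         "K": "C",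
--         "R": "C",
--         "H": "C",
--     }
--     seq = (sequence or "").strip().upper()
--     mapped = "".join(groups.get(ch, "X") for ch in seq)
--     if not mapped:
--         return "EMPTY"
--     k = max(1, int(k))
--     prefix = mapped[:k]
--     suffix = mapped[-k:]
--     return f"{prefix}|{suffix}|L{len(mapped)//10}"
-- ===== SOURCE B (Python) =====
-- def _group(ch):
--     for members, g in (("AVILMFWY", "H"), ("CGP", "S"), ("STNQ", "P"), ("DEKRH", "C")):
--         if ch in members:
--             return g
--     return "X"
--
--
-- def _protein_scaffold_key(sequence: str, k: int = 3) -> str: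
--     seq = (sequence or "").strip().upper()
--     kk = max(1, int(k))
--     n = 0
--     pre = []   # first kk group codes
--     suf = []   # sliding buffer whose last kk entries are the last kk group codes
--     for ch in seq:
--         g = _group(ch)
--         n += 1
--         if len(pre) < kk:
--             pre.append(g)
--         suf.append(g)
--         if len(suf) >= 2 * kk:
--             del suf[:kk]   # amortized O(1): shed the stale front half
--     if n == 0:
--         return "EMPTY"
--     return f"{''.join(pre)}|{''.join(suf[-kk:])}|L{n // 10}"
-- ===== Notes on version B (the rewrite author's own statement) =====
-- stated objective: alternative
-- what changed: B is a single streaming pass with O(k) state: instead of building the full group-mapped string and slicing it, it folds over the characters once, keeping a counter, the first k group codes and an amortized sliding buffer of recent group codes (halved whenever it doubles), classifying characters by scanning a tuple of (members, code) pairs rather than a dict.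
import Mathlib
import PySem

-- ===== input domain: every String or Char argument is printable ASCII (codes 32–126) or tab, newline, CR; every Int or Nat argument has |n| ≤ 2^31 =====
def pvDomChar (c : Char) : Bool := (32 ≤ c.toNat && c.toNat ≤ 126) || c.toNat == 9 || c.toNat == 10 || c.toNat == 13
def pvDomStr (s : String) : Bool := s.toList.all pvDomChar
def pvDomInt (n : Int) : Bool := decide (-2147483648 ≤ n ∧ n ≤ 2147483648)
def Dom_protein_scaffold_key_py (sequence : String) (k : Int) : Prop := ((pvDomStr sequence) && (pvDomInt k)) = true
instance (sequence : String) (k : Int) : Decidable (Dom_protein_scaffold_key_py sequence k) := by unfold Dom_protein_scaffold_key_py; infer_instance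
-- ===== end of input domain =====

-- B replaces A's build-the-whole-mapped-string-then-slice with a single streaming fold that keeps
-- only a counter, the first k group codes and a k-wide sliding window of the last group codes
-- (objective: alternative).

-- ===== PORT A =====
-- the `groups` dict: keys/values are 1-char Python strings, ported as Chars (exact for 1-char lookups)
def pvGroups : PySem.Dict Char Char := PySem.Dict.mk
  [('A','H'),('V','H'),('I','H'),('L','H'),('M','H'),('F','H'),('W','H'),('Y','H'),
   ('C','S'),('G','S'),('P','S'),
   ('S','P'),('T','P'),('N','P'),('Q','P'),
   ('D','C'),('E','C'),('K','C'),('R','C'),('H','C')]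

def protein_scaffold_key_py (sequence : String) (k : Int) : String :=
  -- seq = (sequence or "").strip().upper()
  let seq := PySem.Str.upper (PySem.Str.strip (if sequence = "" then "" else sequence))
  -- mapped = "".join(groups.get(ch, "X") for ch in seq)   (join of 1-char strings = the char list)
  let mapped : List Char := seq.toList.map (fun ch => PySem.Dict.getD pvGroups ch 'X')
  if mapped = [] then "EMPTY"
  else
    -- k = max(1, int(k))   (int(k) is the identity on an int)
    let k' : Int := max 1 k
    let pre := PySem.List.slice mapped none (some k')
    let suf := PySem.List.slice mapped (some (-k')) none
    -- f"{prefix}|{suffix}|L{len(mapped)//10}"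
    String.ofList (pre ++ '|' :: suf ++ '|' :: 'L' ::
      (PySem.Int.toStr (PySem.Int.floordiv (mapped.length : Int) 10)).toList)

-- ===== PORT B =====
-- the tuple of (members, group-code) pairs that _group scans; `ch in members` on a 1-char ch is char membership
def pvGroupTable : List (List Char × Char) :=
  [(['A','V','I','L','M','F','W','Y'],'H'), (['C','G','P'],'S'), (['S','T','N','Q'],'P'), (['D','E','K','R','H'],'C')]

-- _group: the for-loop returns at the FIRST pair whose members contain ch (= List.find?), else "X"
def pvGroup (ch : Char) : Char :=
  match pvGroupTable.find? (fun p => p.1.contains ch) with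
  | some p => p.2
  | none => 'X'

-- one iteration of B's loop body on the state (n, pre, suf); `del suf[:kk]` drops the first kk entries (exact)
def pvStep (kk : Int) (st : Int × List Char × List Char) (ch : Char) : Int × List Char × List Char :=
  let g := pvGroup ch
  let n := st.1 + 1
  let pre := if (st.2.1.length : Int) < kk then st.2.1 ++ [g] else st.2.1
  let s := st.2.2 ++ [g]
  let suf := if 2 * kk ≤ (s.length : Int) then s.drop kk.toNat else s
  (n, pre, suf)

def protein_scaffold_key_py_alt (sequence : String) (k : Int) : String :=
  let seq := PySem.Str.upper (PySem.Str.strip (if sequence = "" then "" else sequence))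
  let kk : Int := max 1 k
  let st := seq.toList.foldl (pvStep kk) (0, [], [])
  if st.1 = 0 then "EMPTY"
  else
    -- ''.join(suf[-kk:]) : the last kk entries of the buffer
    String.ofList (st.2.1 ++ '|' :: PySem.List.slice st.2.2 (some (-kk)) none ++ '|' :: 'L' ::
      (PySem.Int.toStr (PySem.Int.floordiv st.1 10)).toList)

-- ===== PRECONDITION & SPEC =====
def Spec_protein_scaffold_key_py (sequence : String) (k : Int) (out : String) : Prop := out = protein_scaffold_key_py_alt sequence k
instance (sequence : String) (k : Int) (out : String) : Decidable (Spec_protein_scaffold_key_py sequence k out) := by unfold Spec_protein_scaffold_key_py; infer_instance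

-- ===== CLAIM (what is proved, stated in full; the proofs are below) =====
def Claim_equal_protein_scaffold_key_py : Prop := ∀ (sequence : String) (k : Int), Dom_protein_scaffold_key_py sequence k → Spec_protein_scaffold_key_py sequence k (protein_scaffold_key_py sequence k)

-- ===== LEMMAS AND PROOFS =====

-- the dict lookup and the table-scan classifier agree on every char
theorem pv_group_eq (c : Char) : PySem.Dict.getD pvGroups c 'X' = pvGroup c := by
  by_cases h : c ∈ ['A','V','I','L','M','F','W','Y','C','G','P','S','T','N','Q','D','E','K','R','H']
  · fin_cases h <;> rfl
  · simp only [List.mem_cons, List.not_mem_nil, or_false, not_or] at h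
    obtain ⟨hA,hV,hI,hL,hM,hF,hW,hY,hC,hG,hP,hS,hT,hN,hQ,hD,hE,hK,hR,hH⟩ := h
    simp [pvGroups, pvGroup, pvGroupTable, PySem.Dict.getD, PySem.Dict.get?,
      hA, hV, hI, hL, hM, hF, hW, hY, hC, hG, hP, hS, hT, hN, hQ, hD, hE, hK, hR, hH,
      Ne.symm hA, Ne.symm hV, Ne.symm hI, Ne.symm hL, Ne.symm hM, Ne.symm hF, Ne.symm hW, Ne.symm hY, Ne.symm hC,
      Ne.symm hG, Ne.symm hP, Ne.symm hS, Ne.symm hT, Ne.symm hN, Ne.symm hQ, Ne.symm hD, Ne.symm hE, Ne.symm hK,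
      Ne.symm hR, Ne.symm hH]

-- invariant of B's fold: the state is (length so far, first kk group codes, a buffer = some suffix
-- m.drop (L - r) of the mapped prefix whose length r is at least kk once L ≥ kk and stays below 2·kk)
theorem pv_fold_inv (kk : Int) (hk : 1 ≤ kk) (xs : List Char) :
    ∃ r : Nat,
      xs.foldl (pvStep kk) (0, [], []) =
        ((xs.length : Int),
         (xs.map pvGroup).take kk.toNat,
         (xs.map pvGroup).drop (xs.length - r)) ∧
      r < 2 * kk.toNat ∧ (r = xs.length ∨ kk.toNat ≤ r) ∧ r ≤ xs.length := by
  induction xs using List.reverseRecOn with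
  | nil => exact ⟨0, by simp, by omega, Or.inl rfl, by omega⟩
  | append_singleton xs x ih =>
    obtain ⟨r, heq, hlt, hok, hrL⟩ := ih
    rw [List.foldl_append, heq]
    simp only [pvStep, List.foldl_cons, List.foldl_nil, List.map_append, List.map_cons,
      List.map_nil, List.length_append, List.length_cons, List.length_nil, Prod.mk.injEq]
    set m := xs.map pvGroup with hm
    have hlm : m.length = xs.length := by simp [hm]
    have hpre : (if ((m.take kk.toNat).length : Int) < kk then m.take kk.toNat ++ [pvGroup x]
        else m.take kk.toNat) = (m ++ [pvGroup x]).take kk.toNat := by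
      split_ifs with hc
      · have h : xs.length < kk.toNat := by
          simp only [List.length_take, hlm] at hc; omega
        rw [List.take_of_length_le (by omega), List.take_of_length_le (by simp [hlm]; omega)]
      · have h : kk.toNat ≤ xs.length := by
          simp only [List.length_take, hlm] at hc; omega
        rw [List.take_append_of_le_length (by omega)]
    have hdl : (m.drop (xs.length - r)).length = r := by
      simp [hlm]; omega
    by_cases hc : 2 * kk ≤ ((((m.drop (xs.length - r)).length + (0 + 1)) : Nat) : Int)
    · -- the buffer just reached 2·kk entries: shed the front kk of them
      have h2 : r + 1 = 2 * kk.toNat := by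
        rw [hdl] at hc; omega
      refine ⟨r + 1 - kk.toNat, ?_, by omega, Or.inr (by omega), by omega⟩
      rw [if_pos hc, hpre]
      refine ⟨by push_cast; ring, rfl, ?_⟩
      have hr1 : kk.toNat ≤ r := by omega
      have e1 : xs.length + (0 + 1) - (r + 1 - kk.toNat) = (xs.length - r) + kk.toNat := by omega
      rw [List.drop_append_of_le_length (by omega), List.drop_drop, e1,
          List.drop_append_of_le_length (by simp [hlm]; omega)]
    · refine ⟨r + 1, ?_, ?_, ?_, by omega⟩
      · rw [if_neg hc, hpre]
        refine ⟨by push_cast; ring, rfl, ?_⟩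
        have e1 : xs.length + (0 + 1) - (r + 1) = xs.length - r := by omega
        rw [e1, List.drop_append_of_le_length (by rw [hlm]; omega)]
      · rw [hdl] at hc; omega
      · rcases hok with h | h
        · exact Or.inl (by omega)
        · exact Or.inr (by omega)

-- ===== VERDICT (by name: the statement is the Claim_ definition above) =====
theorem protein_scaffold_key_py_spec : Claim_equal_protein_scaffold_key_py := by
  intro sequence k _
  unfold Spec_protein_scaffold_key_py protein_scaffold_key_py protein_scaffold_key_py_alt
  set seq := PySem.Str.upper (PySem.Str.strip (if sequence = "" then "" else sequence)) with hseq
  simp only []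
  have hmap : seq.toList.map (fun ch => PySem.Dict.getD pvGroups ch 'X') = seq.toList.map pvGroup :=
    List.map_congr_left (fun ch _ => pv_group_eq ch)
  obtain ⟨r, heq, hlt, hok, hrL⟩ := pv_fold_inv (max 1 k) (le_max_left 1 k) seq.toList
  rw [hmap, heq]
  have hk1 : (0:Int) ≤ max 1 k := le_trans (by norm_num) (le_max_left 1 k)
  have hkpos : 0 < (max 1 k).toNat := by omega
  have hkcast : max 1 k = (((max 1 k).toNat : Nat) : Int) := by omega
  set m := seq.toList.map pvGroup with hm
  have hlm : m.length = seq.toList.length := by simp [hm]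
  by_cases hempty : seq.toList = []
  · simp [hempty, hm]
  · have hA : ¬ m = [] := by simp [hm, hempty]
    have hB : ¬ ((seq.toList.length : Int), m.take (max 1 k).toNat,
        m.drop (seq.toList.length - r)).1 = 0 := by
      simp only []
      intro hcontra
      exact hempty (List.length_eq_zero_iff.mp (by exact_mod_cast hcontra))
    rw [if_neg hA, if_neg hB]
    simp only []
    have hdlen : (m.drop (seq.toList.length - r)).length = r := by
      rw [List.length_drop, hlm]; omega
    rw [PySem.List.slice_to _ hk1, hkcast,
        PySem.List.slice_from_neg_natCast _ _ hkpos,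
        PySem.List.slice_from_neg_natCast _ _ hkpos,
        hdlen, List.drop_drop, Int.toNat_natCast, hlm]
    -- (L - r) + (r - kk) = L - kk: when r = L both sides are L - kk; when kk ≤ r it is Nat arithmetic
    have e : (seq.toList.length - r) + (r - (max 1 k).toNat) = seq.toList.length - (max 1 k).toNat := by
      rcases hok with h | h <;> omega
    rw [e]
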